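-- pv_equiv track=rewrite | github.com/uf-icbr-bioinformatics/ba3p | bin/writeModelXML.py | makeToLine
-- ===== SOURCE A (Python) =====
-- def makeToLine(n, i):
--     d = []
--     for row in range(n):
--         for col in range(n):
--             if col == i:
--                 if row == i:
--                     d.append("0")
--                 else:
--                     d.append("1")
--             else:
--                 d.append("0")
--     return d
-- ===== SOURCE B (Python) =====
-- def makeToLine(n, i):
--     if n <= 0:
--         return []
--     d = ["0"] * (n * n)
--     if 0 <= i < n:
--         for row in range(n):
--             if row != i:
--                 d[row * n + i] = "1"
--     return d
-- ===== Notes on version B (the rewrite author's own statement) =====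
-- stated objective: simpler
-- what changed: Preallocates the whole flat matrix as zeros and writes only the n-1 ones of column i in a single sparse pass, instead of deciding every cell with a nested loop and conditional chain.
import Mathlib
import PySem

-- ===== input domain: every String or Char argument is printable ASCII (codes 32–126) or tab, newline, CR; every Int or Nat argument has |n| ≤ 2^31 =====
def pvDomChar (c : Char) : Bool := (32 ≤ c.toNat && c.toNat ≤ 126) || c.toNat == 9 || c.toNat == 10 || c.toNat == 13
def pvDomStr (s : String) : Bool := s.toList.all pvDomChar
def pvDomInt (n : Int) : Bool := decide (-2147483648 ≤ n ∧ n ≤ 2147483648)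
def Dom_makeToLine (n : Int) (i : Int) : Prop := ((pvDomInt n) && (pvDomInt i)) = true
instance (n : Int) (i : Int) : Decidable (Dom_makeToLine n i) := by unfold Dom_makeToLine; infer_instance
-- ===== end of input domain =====

-- B preallocates the flat matrix as zeros and writes only column i's ones in one sparse pass (simpler than A's per-cell nested conditional scan).


-- ===== PORT A =====
def makeToLine (n : Int) (i : Int) : List String :=
  (PySem.List.pyRange 0 n 1).foldl (fun d row =>
    (PySem.List.pyRange 0 n 1).foldl (fun d col =>
      if col = i then
        (if row = i then d ++ ["0"] else d ++ ["1"])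
      else d ++ ["0"]) d) []

-- ===== PORT B =====
def makeToLine_alt (n : Int) (i : Int) : List String :=
  if n ≤ 0 then []
  else
    let d := List.replicate (n * n).toNat "0"
    if 0 ≤ i ∧ i < n then
      (PySem.List.pyRange 0 n 1).foldl (fun d row =>
        if row ≠ i then d.set (row * n + i).toNat "1" else d) d
    else d

-- ===== PRECONDITION & SPEC =====
def Spec_makeToLine (n : Int) (i : Int) (out : List String) : Prop := out = makeToLine_alt n i
instance (n : Int) (i : Int) (out : List String) : Decidable (Spec_makeToLine n i out) := by unfold Spec_makeToLine; infer_instance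

-- ===== CLAIM (what is proved, stated in full; the proofs are below) =====
def Claim_equal_makeToLine : Prop := ∀ (n : Int) (i : Int), Dom_makeToLine n i → Spec_makeToLine n i (makeToLine n i)

-- ===== LEMMAS AND PROOFS =====

-- the row produced by A for row index r
def rowOf (n i r : Int) : List String :=
  (PySem.List.pyRange 0 n 1).map (fun c => if c = i then (if r = i then "0" else "1") else "0")

lemma length_rowOf (n i r : Int) : (rowOf n i r).length = n.toNat := by
  simp [rowOf, PySem.List.length_pyRange_one]

lemma makeToLine_eq_flatMap (n i : Int) :
    makeToLine n i = (PySem.List.pyRange 0 n 1).flatMap (rowOf n i) := by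
  unfold makeToLine
  have hinner : (fun (d : List String) (row : Int) =>
      (PySem.List.pyRange 0 n 1).foldl (fun d col =>
        if col = i then (if row = i then d ++ ["0"] else d ++ ["1"]) else d ++ ["0"]) d)
      = fun d row => d ++ rowOf n i row := by
    funext d row
    have hbody : (fun (d : List String) (col : Int) =>
        if col = i then (if row = i then d ++ ["0"] else d ++ ["1"]) else d ++ ["0"])
        = fun d col => d ++ [if col = i then (if row = i then "0" else "1") else "0"] := by
      funext d col; split_ifs <;> rfl
    rw [hbody, PySem.List.foldl_append_singleton_eq_map]
    rfl
  rw [hinner, PySem.List.foldl_append_eq_flatMap]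
  rfl

lemma flatMap_const_replicate {α : Type} (xs : List Int) (m : Nat) (a : α) :
    xs.flatMap (fun _ => List.replicate m a) = List.replicate (xs.length * m) a := by
  induction xs with
  | nil => simp
  | cons x xs ih =>
    simp only [List.flatMap_cons, ih, List.length_cons, List.replicate_append_replicate]
    congr 1; ring

lemma rowOf_diag (n i : Int) : rowOf n i i = List.replicate n.toNat "0" := by
  apply List.ext_getElem
  · simp [length_rowOf]
  · intro j h1 h2
    simp [rowOf]

lemma rowOf_out (n i : Int) (h : i < 0 ∨ n ≤ i) (r : Int) :
    rowOf n i r = List.replicate n.toNat "0" := by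
  apply List.ext_getElem
  · simp [length_rowOf]
  · intro j h1 _h2
    have hj : j < n.toNat := by simpa [length_rowOf] using h1
    simp only [rowOf, List.getElem_map, List.getElem_replicate,
      PySem.List.getElem_pyRange_one]
    rw [if_neg (by omega)]

lemma rowOf_ne (n i : Int) (h0 : 0 ≤ i) (_h1 : i < n) (r : Int) (hr : r ≠ i) :
    rowOf n i r = (List.replicate n.toNat "0").set i.toNat "1" := by
  apply List.ext_getElem
  · simp [length_rowOf]
  · intro j hA hB
    have hj : j < n.toNat := by simpa [length_rowOf] using hA
    simp only [rowOf, List.getElem_map, PySem.List.getElem_pyRange_one,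
      List.getElem_set, List.getElem_replicate]
    by_cases hcase : (j : Int) = i
    · rw [if_pos (by omega), if_neg hr, if_pos (by omega)]
    · rw [if_neg (by omega), if_neg (by omega)]

lemma length_flatMap_rowOf (n i : Int) (L : List Int) :
    (L.flatMap (rowOf n i)).length = L.length * n.toNat := by
  induction L with
  | nil => simp
  | cons x xs ih => simp [ih, length_rowOf, Nat.succ_mul]; ring

-- fold invariant for B's sparse-write pass: after the first k rows, the prefix equals A's
-- first k rows and the rest is still all zeros
lemma foldB (n i : Int) (h0 : 0 < n) (hi : 0 ≤ i) (hin : i < n) (k : Nat) (hk : (k : Int) ≤ n) :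
    (PySem.List.pyRange 0 (k : Int) 1).foldl
        (fun d row => if row ≠ i then d.set (row * n + i).toNat "1" else d)
        (List.replicate (n.toNat * n.toNat) "0")
    = (PySem.List.pyRange 0 (k : Int) 1).flatMap (rowOf n i)
      ++ List.replicate ((n.toNat - k) * n.toNat) "0" := by
  induction k with
  | zero => simp [PySem.List.pyRange_one_eq_nil]
  | succ k ih =>
    have hk' : (k : Int) ≤ n := by push_cast at hk ⊢; omega
    have hkn : k < n.toNat := by omega
    have hsplit : PySem.List.pyRange 0 ((k : Int) + 1) 1
        = PySem.List.pyRange 0 (k : Int) 1 ++ [(k : Int)] :=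
      PySem.List.pyRange_one_succ_right (by positivity)
    have hcast : ((k + 1 : Nat) : Int) = (k : Int) + 1 := by push_cast; ring
    rw [hcast, hsplit, List.foldl_append, ih hk']
    simp only [List.foldl_cons, List.foldl_nil, List.flatMap_append, List.flatMap_cons,
      List.flatMap_nil, List.append_nil]
    by_cases hdiag : (k : Int) = i
    · rw [if_neg (by simp [hdiag]), hdiag, rowOf_diag]
      rw [show (n.toNat - k) * n.toNat = n.toNat + (n.toNat - (k + 1)) * n.toNat by
        rw [show n.toNat - k = (n.toNat - (k + 1)) + 1 from by omega, Nat.succ_mul,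
          Nat.add_comm]]
      rw [← List.replicate_append_replicate, List.append_assoc]
    · rw [if_pos hdiag]
      have hidx : ((k : Int) * n + i).toNat = k * n.toNat + i.toNat := by
        have hn' : ((n.toNat : Int)) = n := Int.toNat_of_nonneg (le_of_lt h0)
        have hi' : ((i.toNat : Int)) = i := Int.toNat_of_nonneg hi
        rw [show ((k : Int) * n + i) = ((k * n.toNat + i.toNat : Nat) : Int) by
          push_cast [hn', hi']; ring, Int.toNat_natCast]
      have hlen : ((PySem.List.pyRange 0 (k : Int) 1).flatMap (rowOf n i)).length
          = k * n.toNat := by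
        rw [length_flatMap_rowOf, PySem.List.length_pyRange_one,
          show ((k : Int) - 0).toNat = k from by omega]
      rw [hidx, List.set_append, if_neg (by omega), hlen]
      rw [show k * n.toNat + i.toNat - k * n.toNat = i.toNat by omega]
      rw [show (n.toNat - k) * n.toNat = n.toNat + (n.toNat - (k + 1)) * n.toNat by
        rw [show n.toNat - k = (n.toNat - (k + 1)) + 1 from by omega, Nat.succ_mul,
          Nat.add_comm]]
      rw [← List.replicate_append_replicate, List.set_append,
        if_pos (by simp [List.length_replicate]; omega)]
      rw [← rowOf_ne n i hi hin (k : Int) hdiag, List.append_assoc]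

theorem makeToLine_spec' (n i : Int) : makeToLine n i = makeToLine_alt n i := by
  rw [makeToLine_eq_flatMap]
  unfold makeToLine_alt
  by_cases hn : n ≤ 0
  · rw [if_pos hn, PySem.List.pyRange_one_eq_nil hn, List.flatMap_nil]
  · rw [if_neg hn]
    have h0 : 0 < n := by omega
    have hNN : (n * n).toNat = n.toNat * n.toNat :=
      Int.toNat_mul (le_of_lt h0) (le_of_lt h0)
    by_cases hi : 0 ≤ i ∧ i < n
    · rw [if_pos hi]
      have hfin := foldB n i h0 hi.1 hi.2 n.toNat
        (le_of_eq (Int.toNat_of_nonneg (le_of_lt h0)))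
      rw [Int.toNat_of_nonneg (le_of_lt h0)] at hfin
      simp only [hNN]
      rw [hfin, Nat.sub_self, Nat.zero_mul, List.replicate_zero, List.append_nil]
    · rw [if_neg hi]
      have hout : i < 0 ∨ n ≤ i := by omega
      calc (PySem.List.pyRange 0 n 1).flatMap (rowOf n i)
          = (PySem.List.pyRange 0 n 1).flatMap (fun _ => List.replicate n.toNat "0") := by
            apply List.flatMap_congr; intro r _; exact rowOf_out n i hout r
        _ = List.replicate (n * n).toNat "0" := by
            rw [flatMap_const_replicate, PySem.List.length_pyRange_one, hNN,
              show (n - 0).toNat = n.toNat from by omega]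

-- ===== VERDICT (by name: the statement is the Claim_ definition above) =====
theorem makeToLine_spec : Claim_equal_makeToLine := by
  intro n i _
  exact makeToLine_spec' n i
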